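-- pv_equiv track=rewrite | github.com/Dodo327/PPPD | lab_5/lab5_2019_A.py | najlepszy_podzial
-- ===== SOURCE A (Python) =====
-- def drzewo(x, y):
--     if x >= 0 and x <= 10 and y >= 0 and y <= 10:
--         return (x == y) and (x % 10 < 4 or x % 10 > 5)
--     elif x >= -10 and x <= -1 and y >= 0 and y <= 10:
--         return True
--     else:
--         return False
--
-- def najmniejszy_plot(x_min, x_max, y_min, y_max):
--     najmniejszy_x = None
--     najwiekszy_x = None
--     najmniejszy_y = None
--     najwiekszy_y = None
--     if x_min >= x_max or y_min >= y_max: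
--         return 0, 0, 0, 0
--
--     jest_drzewo = False
--     for i in range(x_min, x_max + 1):
--         for j in range(y_min, y_max + 1):
--             if drzewo(i, j):
--                 jest_drzewo = True
--                 if najmniejszy_x == None or najmniejszy_x > i:
--                     najmniejszy_x = i
--                 if najmniejszy_y == None or najmniejszy_y > j:
--                     najmniejszy_y = j
--                 if najwiekszy_x == None or najwiekszy_x < i:
--                     najwiekszy_x = i
--                 if najwiekszy_y == None or najwiekszy_y < j:
--                     najwiekszy_y = j
--
--     if not jest_drzewo:
--         return 0, 0, 0, 0
--     return najmniejszy_x, najwiekszy_x, najmniejszy_y, najwiekszy_y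
--
-- def obwod_prostokata(x_min, x_max, y_min, y_max):
--     return 2 * ((x_max - x_min) + (y_max - y_min))
--
-- def najlepszy_podzial(x_min, x_max, y_min, y_max):
--     najlepszy_x = None
--     a, b, c, d = najmniejszy_plot(x_min, x_max, y_min, y_max)
--     najlepszy_obwod = obwod_prostokata(a, b, c, d)
--
--     for i in range(x_min, x_max + 1):
--         a1, b1, c1, d1 = najmniejszy_plot(x_min, i, y_min, y_max)
--         a2, b2, c2, d2 = najmniejszy_plot(i + 1, x_max, y_min, y_max)
--
--         nowy_obwod = obwod_prostokata(a1, b1, c1, d1) + obwod_prostokata(a2, b2, c2, d2)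
--
--         if nowy_obwod < najlepszy_obwod:
--             najlepszy_obwod = nowy_obwod
--             najlepszy_x = i
--
--     return najlepszy_x
-- ===== SOURCE B (Python) =====
-- def drzewo(x, y):
--     if x >= 0 and x <= 10 and y >= 0 and y <= 10:
--         return (x == y) and (x % 10 < 4 or x % 10 > 5)
--     elif x >= -10 and x <= -1 and y >= 0 and y <= 10:
--         return True
--     else:
--         return False
--
--
-- def _merge(b1, b2):
--     # union of two optional bounding boxes (x_lo, x_hi, y_lo, y_hi)
--     if b1 is None:
--         return b2
--     if b2 is None:
--         return b1
--     return (min(b1[0], b2[0]), max(b1[1], b2[1]),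
--             min(b1[2], b2[2]), max(b1[3], b2[3]))
--
--
-- def _per(b):
--     return 0 if b is None else 2 * ((b[1] - b[0]) + (b[3] - b[2]))
--
--
-- def najlepszy_podzial(x_min, x_max, y_min, y_max):
--     # A plot is non-degenerate only when x_min < x_max and y_min < y_max;
--     # otherwise every perimeter is 0 and no split is ever strictly better.
--     if x_min >= x_max or y_min >= y_max:
--         return None
--
--     # one pass: per-column bounding box of the trees; drzewo(x, y) is False
--     # outside -10 <= x <= 10 and 0 <= y <= 10, so only that band is scanned
--     cols = []
--     for x in range(x_min, x_max + 1):
--         rng = None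
--         if -10 <= x <= 10:
--             for y in range(max(y_min, 0), min(y_max, 10) + 1):
--                 if drzewo(x, y):
--                     rng = (y, y) if rng is None else (min(rng[0], y), max(rng[1], y))
--         cols.append(None if rng is None else (x, x, rng[0], rng[1]))
--
--     # suf[k] = bounding box of columns k..W-1
--     suf = [None]
--     for c in reversed(cols):
--         suf.append(_merge(c, suf[-1]))
--     suf.reverse()
--
--     W = x_max - x_min + 1
--     best = _per(suf[0])
--     best_i = None
--     run = None
--     idx = 0
--     for c, s in zip(cols, suf[1:]):
--         run = _merge(run, c)
--         # left plot [x_min, i] counts only when idx >= 1; right plot [i+1, x_max]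
--         # only when i+1 < x_max, i.e. idx < W - 2
--         f = (_per(run) if idx >= 1 else 0) + (_per(s) if idx < W - 2 else 0)
--         if f < best:
--             best = f
--             best_i = x_min + idx
--         idx += 1
--     return best_i
-- ===== Notes on version B (the rewrite author's own statement) =====
-- stated objective: alternative
-- what changed: B replaces A's full grid rescan per candidate split (najmniejszy_plot inside an O(W) loop) by one pass building per-column tree bounding boxes (scanning only the band -10<=x<=10, 0<=y<=10 where drzewo can be true) plus a suffix array and a running prefix of merged boxes, so each split is evaluated in O(1).
import Mathlib
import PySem

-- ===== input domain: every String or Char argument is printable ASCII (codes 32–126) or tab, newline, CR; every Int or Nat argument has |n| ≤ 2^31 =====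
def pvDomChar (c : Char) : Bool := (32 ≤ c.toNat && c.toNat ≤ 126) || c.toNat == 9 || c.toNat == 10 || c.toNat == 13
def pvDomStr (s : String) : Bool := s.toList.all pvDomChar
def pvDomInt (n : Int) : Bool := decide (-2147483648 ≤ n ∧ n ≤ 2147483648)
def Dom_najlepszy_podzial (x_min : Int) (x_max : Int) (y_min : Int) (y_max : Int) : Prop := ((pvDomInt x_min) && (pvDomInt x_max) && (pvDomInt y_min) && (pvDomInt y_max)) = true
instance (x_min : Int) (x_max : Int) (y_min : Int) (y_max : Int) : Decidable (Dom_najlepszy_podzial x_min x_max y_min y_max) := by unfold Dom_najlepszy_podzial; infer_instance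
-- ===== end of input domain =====

-- B replaces A's full grid rescan per candidate split by one pass computing per-column tree
-- bounding boxes (only over the band where drzewo can be true) plus suffix/prefix bounding
-- boxes, evaluating each split in O(1) (objective: alternative algorithm).

-- ===== PORT A =====
def drzewo (x : Int) (y : Int) : Bool :=
  if 0 ≤ x ∧ x ≤ 10 ∧ 0 ≤ y ∧ y ≤ 10 then
    (x == y) && (decide (PySem.Int.mod x 10 < 4) || decide (5 < PySem.Int.mod x 10))
  else if -10 ≤ x ∧ x ≤ -1 ∧ 0 ≤ y ∧ y ≤ 10 then true
  else false

-- 'najmniejszy_x == None or najmniejszy_x > i' update, as in A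
def aOptMin (o : Option Int) (v : Int) : Option Int :=
  match o with
  | none => some v
  | some a => if a > v then some v else some a

def aOptMax (o : Option Int) (v : Int) : Option Int :=
  match o with
  | none => some v
  | some a => if a < v then some v else some a

abbrev PlotState := Option Int × Option Int × Option Int × Option Int × Bool

def plotStep (i : Int) (s : PlotState) (j : Int) : PlotState :=
  if drzewo i j then
    (aOptMin s.1 i, aOptMax s.2.1 i, aOptMin s.2.2.1 j, aOptMax s.2.2.2.1 j, true)
  else s

def najmniejszy_plot (x_min x_max y_min y_max : Int) : Int × Int × Int × Int :=
  if x_min ≥ x_max ∨ y_min ≥ y_max then (0, 0, 0, 0)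
  else
    let s : PlotState := (PySem.List.pyRange x_min (x_max + 1) 1).foldl
      (fun s i => (PySem.List.pyRange y_min (y_max + 1) 1).foldl (plotStep i) s)
      (none, none, none, none, false)
    if s.2.2.2.2 = false then (0, 0, 0, 0)
    else (s.1.getD 0, s.2.1.getD 0, s.2.2.1.getD 0, s.2.2.2.1.getD 0)

def obwod_prostokata (x_min x_max y_min y_max : Int) : Int :=
  2 * ((x_max - x_min) + (y_max - y_min))

def najlepszy_podzial (x_min : Int) (x_max : Int) (y_min : Int) (y_max : Int) : Option Int :=
  let p := najmniejszy_plot x_min x_max y_min y_max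
  let best0 := obwod_prostokata p.1 p.2.1 p.2.2.1 p.2.2.2
  let r := (PySem.List.pyRange x_min (x_max + 1) 1).foldl
    (fun (st : Option Int × Int) i =>
      let p1 := najmniejszy_plot x_min i y_min y_max
      let p2 := najmniejszy_plot (i + 1) x_max y_min y_max
      let nowy := obwod_prostokata p1.1 p1.2.1 p1.2.2.1 p1.2.2.2 +
                  obwod_prostokata p2.1 p2.2.1 p2.2.2.1 p2.2.2.2
      if nowy < st.2 then (some i, nowy) else st)
    (none, best0)
  r.1

-- ===== PORT B =====
abbrev Box := Option (Int × Int × Int × Int)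

def mergeB (b1 b2 : Box) : Box :=
  match b1, b2 with
  | none, b2 => b2
  | b1, none => b1
  | some (a1, b1', c1, d1), some (a2, b2', c2, d2) =>
      some (min a1 a2, max b1' b2', min c1 c2, max d1 d2)

def perB : Box → Int
  | none => 0
  | some (a, b, c, d) => 2 * ((b - a) + (d - c))

def colStep (x : Int) (r : Option (Int × Int)) (y : Int) : Option (Int × Int) :=
  if drzewo x y then
    match r with
    | none => some (y, y)
    | some (lo, hi) => some (min lo y, max hi y)
  else r

-- trees exist only for -10 <= x <= 10 and 0 <= y <= 10 (see drzewo), so B scans only that band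
def colB (x y_min y_max : Int) : Box :=
  match (if -10 ≤ x ∧ x ≤ 10 then
      (PySem.List.pyRange (max y_min 0) (min y_max 10 + 1) 1).foldl (colStep x) none
    else none) with
  | none => none
  | some (lo, hi) => some (x, x, lo, hi)

def sufStep (c : Box) (acc : List Box) : List Box := mergeB c (acc.headD none) :: acc

def bStep (x_min W : Int) (st : Int × Box × Int × Option Int) (cs : Box × Box) :
    Int × Box × Int × Option Int :=
  let idx := st.1
  let run := mergeB st.2.1 cs.1
  let f := (if idx ≥ 1 then perB run else 0) + (if idx < W - 2 then perB cs.2 else 0)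
  if f < st.2.2.1 then (idx + 1, run, f, some (x_min + idx))
  else (idx + 1, run, st.2.2.1, st.2.2.2)

def najlepszy_podzial_alt (x_min : Int) (x_max : Int) (y_min : Int) (y_max : Int) : Option Int :=
  if x_min ≥ x_max ∨ y_min ≥ y_max then none
  else
    let cols := (PySem.List.pyRange x_min (x_max + 1) 1).map (fun x => colB x y_min y_max)
    let suf := cols.foldr sufStep [none]
    let W := x_max - x_min + 1
    let best0 := perB (suf.headD none)
    let st := (List.zip cols suf.tail).foldl (bStep x_min W) (0, none, best0, none)
    st.2.2.2

-- ===== PRECONDITION & SPEC =====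
def Spec_najlepszy_podzial (x_min : Int) (x_max : Int) (y_min : Int) (y_max : Int) (out : Option Int) : Prop := out = najlepszy_podzial_alt x_min x_max y_min y_max
instance (x_min : Int) (x_max : Int) (y_min : Int) (y_max : Int) (out : Option Int) : Decidable (Spec_najlepszy_podzial x_min x_max y_min y_max out) := by unfold Spec_najlepszy_podzial; infer_instance

-- ===== CLAIM (what is proved, stated in full; the proofs are below) =====
def Claim_equal_najlepszy_podzial : Prop := ∀ (x_min : Int) (x_max : Int) (y_min : Int) (y_max : Int), Dom_najlepszy_podzial x_min x_max y_min y_max → Spec_najlepszy_podzial x_min x_max y_min y_max (najlepszy_podzial x_min x_max y_min y_max)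

-- ===== LEMMAS AND PROOFS =====

-- proof-side abstractions
def eS : Box → PlotState
  | none => (none, none, none, none, false)
  | some (a, b, c, d) => (some a, some b, some c, some d, true)

def boxPt (x : Int) (acc : Box) (y : Int) : Box :=
  if drzewo x y then mergeB acc (some (x, x, y, y)) else acc

def liftC (x : Int) : Option (Int × Int) → Box
  | none => none
  | some (lo, hi) => some (x, x, lo, hi)

def prefBox (x_min y_min y_max t : Int) : Box :=
  (PySem.List.pyRange x_min t 1).foldl (fun bb x => mergeB bb (colB x y_min y_max)) none

def sufBox (x_max y_min y_max t : Int) : Box :=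
  ((PySem.List.pyRange t (x_max + 1) 1).map (fun x => colB x y_min y_max)).foldr mergeB none

def tupOf : Box → Int × Int × Int × Int
  | none => (0, 0, 0, 0)
  | some q => q

def obT (q : Int × Int × Int × Int) : Int := obwod_prostokata q.1 q.2.1 q.2.2.1 q.2.2.2

def gFun (x_min x_max y_min y_max i : Int) : Int :=
  (if i - x_min ≥ 1 then perB (prefBox x_min y_min y_max (i + 1)) else 0) +
  (if i - x_min < (x_max - x_min + 1) - 2 then perB (sufBox x_max y_min y_max (i + 1)) else 0)

def gA (x_min x_max y_min y_max i : Int) : Int :=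
  obT (najmniejszy_plot x_min i y_min y_max) + obT (najmniejszy_plot (i + 1) x_max y_min y_max)

def minStep (g : Int → Int) (st : Option Int × Int) (i : Int) : Option Int × Int :=
  if g i < st.2 then (some i, g i) else st

def Zl (cs : List Box) : List (Box × Box) := List.zip cs ((cs.foldr sufStep [none]).tail)

theorem mergeB_none_right (b : Box) : mergeB b none = b := by
  cases b <;> rfl

theorem mergeB_none_left (b : Box) : mergeB none b = b := rfl

theorem mergeB_assoc (a b c : Box) : mergeB (mergeB a b) c = mergeB a (mergeB b c) := by
  rcases a with _ | ⟨a1, a2, a3, a4⟩ <;> rcases b with _ | ⟨b1, b2, b3, b4⟩ <;>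
    rcases c with _ | ⟨c1, c2, c3, c4⟩ <;>
    simp [mergeB, min_assoc, max_assoc]

theorem plotStep_eS (x : Int) (b : Box) (y : Int) :
    plotStep x (eS b) y = eS (boxPt x b y) := by
  rcases b with _ | ⟨a, b', c, d⟩ <;> by_cases h : drzewo x y <;>
    simp [plotStep, boxPt, eS, mergeB, h, aOptMin, aOptMax, Int.min_def, Int.max_def] <;>
    split_ifs <;> simp_all <;> omega

theorem foldl_plotStep_eS (x : Int) (ys : List Int) (b : Box) :
    ys.foldl (plotStep x) (eS b) = eS (ys.foldl (boxPt x) b) := by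
  induction ys generalizing b with
  | nil => rfl
  | cons y t ih => simp [List.foldl, plotStep_eS, ih]

theorem foldl_boxPt_start (x : Int) (ys : List Int) (b : Box) :
    ys.foldl (boxPt x) b = mergeB b (ys.foldl (boxPt x) none) := by
  induction ys generalizing b with
  | nil => simp [mergeB_none_right]
  | cons y t ih =>
    simp only [List.foldl]
    rw [ih (boxPt x b y), ih (boxPt x none y)]
    by_cases h : drzewo x y <;>
      simp [boxPt, h, mergeB_assoc, mergeB_none_left]

theorem foldl_boxPt_liftC (x : Int) (ys : List Int) (r : Option (Int × Int)) :
    ys.foldl (boxPt x) (liftC x r) = liftC x (ys.foldl (colStep x) r) := by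
  induction ys generalizing r with
  | nil => rfl
  | cons y t ih =>
    have hstep : boxPt x (liftC x r) y = liftC x (colStep x r y) := by
      rcases r with _ | ⟨lo, hi⟩ <;> by_cases h : drzewo x y <;>
        simp [boxPt, colStep, liftC, mergeB, h]
    simp [List.foldl, hstep, ih]

theorem drzewo_false_out (x y : Int) (h : x < -10 ∨ 10 < x ∨ y < 0 ∨ 10 < y) :
    drzewo x y = false := by
  unfold drzewo
  split_ifs with h1 h2 <;> first | rfl | omega

theorem foldl_colStep_id (x : Int) (ys : List Int) (r : Option (Int × Int))
    (h : ∀ y ∈ ys, drzewo x y = false) : ys.foldl (colStep x) r = r := by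
  induction ys generalizing r with
  | nil => rfl
  | cons y t ih =>
    simp only [List.foldl]
    rw [show colStep x r y = r by simp [colStep, h y (by simp)]]
    exact ih _ (fun z hz => h z (by simp [hz]))

theorem clamp_colStep (x y_min y_max : Int) :
    (PySem.List.pyRange y_min (y_max + 1) 1).foldl (colStep x) none
      = (if -10 ≤ x ∧ x ≤ 10 then
          (PySem.List.pyRange (max y_min 0) (min y_max 10 + 1) 1).foldl (colStep x) none
        else none) := by
  by_cases hx : -10 ≤ x ∧ x ≤ 10
  · rw [if_pos hx]
    by_cases hr : max y_min 0 ≤ min y_max 10 + 1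
    · rw [PySem.List.pyRange_one_append y_min (max y_min 0) (y_max + 1) (by omega)
          (by omega),
        PySem.List.pyRange_one_append (max y_min 0) (min y_max 10 + 1) (y_max + 1) hr
          (by omega),
        List.foldl_append, List.foldl_append]
      rw [foldl_colStep_id x _ none (fun y hy => by
        have := (PySem.List.mem_pyRange_one).mp hy
        exact drzewo_false_out x y (by omega))]
      rw [foldl_colStep_id x (PySem.List.pyRange (min y_max 10 + 1) (y_max + 1) 1) _
        (fun y hy => by
          have := (PySem.List.mem_pyRange_one).mp hy
          exact drzewo_false_out x y (by omega))]
    · rw [show PySem.List.pyRange (max y_min 0) (min y_max 10 + 1) 1 = [] from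
          PySem.List.pyRange_one_eq_nil (by omega)]
      exact foldl_colStep_id x _ none (fun y hy => by
        have := (PySem.List.mem_pyRange_one).mp hy
        exact drzewo_false_out x y (by omega))
  · rw [if_neg hx]
    exact foldl_colStep_id x _ none (fun y hy =>
      drzewo_false_out x y (by omega))

theorem foldl_boxPt_colB (x y_min y_max : Int) :
    (PySem.List.pyRange y_min (y_max + 1) 1).foldl (boxPt x) none = colB x y_min y_max := by
  have h := foldl_boxPt_liftC x (PySem.List.pyRange y_min (y_max + 1) 1) none
  simp only [liftC] at h
  rw [h, clamp_colStep x y_min y_max, colB]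

theorem outer_fold_eS (y_min y_max : Int) (xs : List Int) (b : Box) :
    xs.foldl (fun s i => (PySem.List.pyRange y_min (y_max + 1) 1).foldl (plotStep i) s) (eS b)
      = eS (xs.foldl (fun bb x => mergeB bb (colB x y_min y_max)) b) := by
  induction xs generalizing b with
  | nil => rfl
  | cons x t ih =>
    simp only [List.foldl]
    rw [foldl_plotStep_eS, foldl_boxPt_start, foldl_boxPt_colB]
    exact ih _

theorem plot_nondeg (a b y_min y_max : Int) (h1 : a < b) (h2 : y_min < y_max) :
    najmniejszy_plot a b y_min y_max =
      tupOf ((PySem.List.pyRange a (b + 1) 1).foldl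
        (fun bb x => mergeB bb (colB x y_min y_max)) none) := by
  have hg : ¬(a ≥ b ∨ y_min ≥ y_max) := by omega
  simp only [najmniejszy_plot, if_neg hg]
  rw [show ((none, none, none, none, false) :
        Option Int × Option Int × Option Int × Option Int × Bool) = eS none from rfl,
    outer_fold_eS]
  cases hF : (PySem.List.pyRange a (b + 1) 1).foldl
      (fun bb x => mergeB bb (colB x y_min y_max)) none with
  | none => simp [eS, tupOf]
  | some q =>
    obtain ⟨p, q2, r, t⟩ := q
    simp [eS, tupOf]

theorem obT_tupOf (bb : Box) : obT (tupOf bb) = perB bb := by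
  rcases bb with _ | ⟨a, b, c, d⟩ <;> simp [obT, tupOf, perB, obwod_prostokata]

theorem foldl_merge_eq_foldr (cs : List Box) (b : Box) :
    cs.foldl mergeB b = mergeB b (cs.foldr mergeB none) := by
  induction cs generalizing b with
  | nil => simp [mergeB_none_right]
  | cons c t ih =>
    simp [List.foldl, List.foldr, ih, mergeB_assoc]

theorem pref_eq_suf (a b y_min y_max : Int) :
    (PySem.List.pyRange a (b + 1) 1).foldl (fun bb x => mergeB bb (colB x y_min y_max)) none
      = sufBox b y_min y_max a := by
  rw [show ((PySem.List.pyRange a (b + 1) 1).foldl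
        (fun bb x => mergeB bb (colB x y_min y_max)) none)
      = ((PySem.List.pyRange a (b + 1) 1).map (fun x => colB x y_min y_max)).foldl mergeB none
      from List.foldl_map.symm]
  rw [foldl_merge_eq_foldr, mergeB_none_left, sufBox]

theorem plot_zero_y (a b y_min y_max : Int) (h : y_min ≥ y_max) :
    najmniejszy_plot a b y_min y_max = (0, 0, 0, 0) := by
  simp [najmniejszy_plot, h]

theorem gA_eq_g (x_min x_max y_min y_max i : Int) (_hx : x_min < x_max) (hy : y_min < y_max)
    (h1 : x_min ≤ i) (h2 : i ≤ x_max) :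
    gA x_min x_max y_min y_max i = gFun x_min x_max y_min y_max i := by
  rw [gA, gFun]
  congr 1
  · by_cases hL : x_min ≥ i
    · rw [show najmniejszy_plot x_min i y_min y_max = (0, 0, 0, 0) by
          simp [najmniejszy_plot, hL]]
      rw [if_neg (by omega)]
      simp [obT, obwod_prostokata]
    · rw [if_pos (by omega), plot_nondeg x_min i y_min y_max (by omega) hy, obT_tupOf]
      rfl
  · by_cases hR : i + 1 ≥ x_max
    · rw [show najmniejszy_plot (i + 1) x_max y_min y_max = (0, 0, 0, 0) by
          simp [najmniejszy_plot, hR]]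
      rw [if_neg (by omega)]
      simp [obT, obwod_prostokata]
    · rw [if_pos (by omega), plot_nondeg (i + 1) x_max y_min y_max (by omega) hy, obT_tupOf,
        pref_eq_suf]

theorem suf_head (cs : List Box) :
    (cs.foldr sufStep [none]).headD none = cs.foldr mergeB none := by
  induction cs with
  | nil => rfl
  | cons c t ih => simp [List.foldr, sufStep, ← ih, List.headD_eq_head?_getD]

theorem Zl_cons (c : Box) (cs : List Box) :
    Zl (c :: cs) = (c, cs.foldr mergeB none) :: Zl cs := by
  cases cs with
  | nil => rfl
  | cons c' cs' =>
    simp [Zl, sufStep, List.headD_eq_head?_getD, ← suf_head]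

theorem pref_succ (x_min y_min y_max a : Int) (h : x_min ≤ a) :
    prefBox x_min y_min y_max (a + 1) =
      mergeB (prefBox x_min y_min y_max a) (colB a y_min y_max) := by
  rw [prefBox, prefBox, PySem.List.pyRange_one_succ_right h, List.foldl_append]
  rfl

theorem B_flatten (x_min x_max y_min y_max : Int) :
    ∀ (n : Nat) (best : Int) (bi : Option Int), x_min ≤ x_max + 1 - (n : Int) →
    ((Zl ((PySem.List.pyRange (x_max + 1 - (n : Int)) (x_max + 1) 1).map
        (fun x => colB x y_min y_max))).foldl (bStep x_min (x_max - x_min + 1))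
        (x_max + 1 - (n : Int) - x_min, prefBox x_min y_min y_max (x_max + 1 - (n : Int)), best, bi)).2.2
      = (((PySem.List.pyRange (x_max + 1 - (n : Int)) (x_max + 1) 1).foldl
            (minStep (gFun x_min x_max y_min y_max)) (bi, best)).2,
         ((PySem.List.pyRange (x_max + 1 - (n : Int)) (x_max + 1) 1).foldl
            (minStep (gFun x_min x_max y_min y_max)) (bi, best)).1) := by
  intro n
  induction n with
  | zero =>
    intro best bi _
    rw [show x_max + 1 - ((0 : Nat) : Int) = x_max + 1 by push_cast; ring]
    rw [PySem.List.pyRange_one_eq_nil (le_refl _)]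
    rfl
  | succ n ih =>
    intro best bi h
    have hc : ((n + 1 : Nat) : Int) = (n : Int) + 1 := by push_cast; ring
    rw [hc] at h ⊢
    set a : Int := x_max + 1 - ((n : Int) + 1) with ha
    have ha1 : a < x_max + 1 := by omega
    rw [PySem.List.pyRange_one_cons ha1]
    simp only [List.map_cons]
    rw [Zl_cons]
    simp only [List.foldl_cons]
    have hsuf : (((PySem.List.pyRange (a + 1) (x_max + 1) 1).map
        (fun x => colB x y_min y_max)).foldr mergeB none) = sufBox x_max y_min y_max (a + 1) := rfl
    have hrun : mergeB (prefBox x_min y_min y_max a) (colB a y_min y_max)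
        = prefBox x_min y_min y_max (a + 1) := (pref_succ x_min y_min y_max a h).symm
    have hstep : bStep x_min (x_max - x_min + 1)
        (a - x_min, prefBox x_min y_min y_max a, best, bi)
        (colB a y_min y_max,
          ((PySem.List.pyRange (a + 1) (x_max + 1) 1).map
            (fun x => colB x y_min y_max)).foldr mergeB none)
        = if gFun x_min x_max y_min y_max a < best
          then (a + 1 - x_min, prefBox x_min y_min y_max (a + 1),
                gFun x_min x_max y_min y_max a, some a)
          else (a + 1 - x_min, prefBox x_min y_min y_max (a + 1), best, bi) := by
      simp only [bStep, hsuf, hrun, gFun]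
      have hx : x_min + (a - x_min) = a := by ring
      have hi : a - x_min + 1 = a + 1 - x_min := by ring
      rw [hx, hi]
    rw [hstep]
    have ha2 : x_max + 1 - (n : Int) = a + 1 := by omega
    have hih := ih
    rw [ha2] at hih
    have hstep2 : minStep (gFun x_min x_max y_min y_max) (bi, best) a
        = if gFun x_min x_max y_min y_max a < best
          then (some a, gFun x_min x_max y_min y_max a) else (bi, best) := rfl
    rw [hstep2]
    by_cases hf : gFun x_min x_max y_min y_max a < best
    · rw [if_pos hf, if_pos hf]
      exact hih (gFun x_min x_max y_min y_max a) (some a) (by omega)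
    · rw [if_neg hf, if_neg hf]
      exact hih best bi (by omega)

theorem foldl_minStep_congr (g1 g2 : Int → Int) (ls : List Int)
    (h : ∀ i ∈ ls, g1 i = g2 i) (st : Option Int × Int) :
    ls.foldl (minStep g1) st = ls.foldl (minStep g2) st := by
  induction ls generalizing st with
  | nil => rfl
  | cons i t ih =>
    simp only [List.foldl]
    rw [show minStep g1 st i = minStep g2 st i by simp [minStep, h i (by simp)]]
    exact ih (fun j hj => h j (by simp [hj])) _

theorem A_shape (x_min x_max y_min y_max : Int) :
    najlepszy_podzial x_min x_max y_min y_max =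
      ((PySem.List.pyRange x_min (x_max + 1) 1).foldl
        (minStep (gA x_min x_max y_min y_max))
        (none, obT (najmniejszy_plot x_min x_max y_min y_max))).1 := by
  rfl

-- ===== VERDICT (by name: the statement is the Claim_ definition above) =====
theorem alt_main (x_min x_max y_min y_max : Int) (hx : x_min < x_max) (hy : y_min < y_max) :
    najlepszy_podzial_alt x_min x_max y_min y_max =
      ((PySem.List.pyRange x_min (x_max + 1) 1).foldl
        (minStep (gFun x_min x_max y_min y_max))
        (none, perB (sufBox x_max y_min y_max x_min))).1 := by
  have hg : ¬(x_min ≥ x_max ∨ y_min ≥ y_max) := by omega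
  simp only [najlepszy_podzial_alt, if_neg hg]
  have hhead := suf_head
    ((PySem.List.pyRange x_min (x_max + 1) 1).map (fun x => colB x y_min y_max))
  rw [hhead]
  have hzip : List.zip ((PySem.List.pyRange x_min (x_max + 1) 1).map (fun x => colB x y_min y_max))
      ((((PySem.List.pyRange x_min (x_max + 1) 1).map (fun x => colB x y_min y_max)).foldr
        sufStep [none]).tail)
      = Zl ((PySem.List.pyRange x_min (x_max + 1) 1).map (fun x => colB x y_min y_max)) := rfl
  rw [hzip]
  have hn0 : (0 : Int) ≤ x_max + 1 - x_min := by omega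
  set n : Nat := (x_max + 1 - x_min).toNat with hn
  have hcast : ((n : Int)) = x_max + 1 - x_min := by
    rw [hn]; exact Int.toNat_of_nonneg hn0
  have ha : x_max + 1 - (n : Int) = x_min := by omega
  have hB := B_flatten x_min x_max y_min y_max n
    (perB (((PySem.List.pyRange x_min (x_max + 1) 1).map (fun x => colB x y_min y_max)).foldr
      mergeB none)) none (by omega)
  rw [ha] at hB
  have hpref0 : prefBox x_min y_min y_max x_min = none := by
    rw [prefBox, PySem.List.pyRange_one_eq_nil (le_refl _)]
    rfl
  have hzero : x_min - x_min = (0 : Int) := by ring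
  rw [hpref0, hzero] at hB
  rw [hB]
  have hsufB : (((PySem.List.pyRange x_min (x_max + 1) 1).map (fun x => colB x y_min y_max)).foldr
      mergeB none) = sufBox x_max y_min y_max x_min := rfl
  rw [hsufB]

theorem najlepszy_podzial_spec : Claim_equal_najlepszy_podzial := by
  unfold Claim_equal_najlepszy_podzial
  intro x_min x_max y_min y_max _
  unfold Spec_najlepszy_podzial
  by_cases hdeg : x_min ≥ x_max ∨ y_min ≥ y_max
  · rw [show najlepszy_podzial_alt x_min x_max y_min y_max = none by
        simp [najlepszy_podzial_alt, hdeg]]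
    rw [A_shape]
    rcases hdeg with hx | hy
    · rcases lt_or_ge x_max x_min with h | h
      · rw [PySem.List.pyRange_one_eq_nil (by omega)]
        rfl
      · have hxe : x_max = x_min := by omega
        subst hxe
        rw [PySem.List.pyRange_one_singleton]
        simp [minStep, gA, najmniejszy_plot, obT, obwod_prostokata]
    · have hall : ∀ i, gA x_min x_max y_min y_max i = 0 := by
        intro i
        simp [gA, plot_zero_y _ _ _ _ hy, obT, obwod_prostokata]
      have hbest : obT (najmniejszy_plot x_min x_max y_min y_max) = 0 := by
        simp [plot_zero_y _ _ _ _ hy, obT, obwod_prostokata]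
      rw [hbest]
      have hfix : ∀ ls : List Int,
          ls.foldl (minStep (gA x_min x_max y_min y_max)) (none, 0) = (none, 0) := by
        intro ls
        induction ls with
        | nil => rfl
        | cons i t ih => simp [List.foldl, minStep, hall i, ih]
      rw [hfix]
  · push Not at hdeg
    obtain ⟨hx, hy⟩ := hdeg
    rw [A_shape, alt_main x_min x_max y_min y_max hx hy]
    have hbest : obT (najmniejszy_plot x_min x_max y_min y_max)
        = perB (sufBox x_max y_min y_max x_min) := by
      rw [plot_nondeg x_min x_max y_min y_max hx hy, obT_tupOf, pref_eq_suf]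
    rw [hbest]
    rw [foldl_minStep_congr (gA x_min x_max y_min y_max) (gFun x_min x_max y_min y_max)
      (PySem.List.pyRange x_min (x_max + 1) 1)
      (fun i hi => by
        have hm := (PySem.List.mem_pyRange_one).mp hi
        exact gA_eq_g x_min x_max y_min y_max i hx hy (by omega) (by omega))]
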